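-- pv_equiv track=rewrite | github.com/Arzuparreta/agent-aquila | backend/app/services/oauth/google_oauth.py | scopes_for_intent
-- ===== SOURCE A (Python) =====
-- SCOPES_GMAIL = [
--     "https://www.googleapis.com/auth/gmail.modify",
--     "https://www.googleapis.com/auth/gmail.settings.basic",
-- ]
--
-- SCOPES_CALENDAR = [
--     "https://www.googleapis.com/auth/calendar",
-- ]
--
-- SCOPES_DRIVE = [
--     "https://www.googleapis.com/auth/drive",
-- ]
--
-- SCOPES_YOUTUBE = [
--     "https://www.googleapis.com/auth/youtube.readonly",
--     "https://www.googleapis.com/auth/youtube",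
--     "https://www.googleapis.com/auth/youtube.upload",
-- ]
--
-- SCOPES_TASKS = [
--     "https://www.googleapis.com/auth/tasks",
-- ]
--
-- SCOPES_PEOPLE = [
--     "https://www.googleapis.com/auth/contacts.readonly",
-- ]
--
-- SCOPES_SHEETS = [
--     "https://www.googleapis.com/auth/spreadsheets",
-- ]
--
-- SCOPES_DOCS = [
--     "https://www.googleapis.com/auth/documents.readonly",
-- ]
--
-- SCOPES_IDENTITY = ["openid", "email", "profile"]
--
-- def scopes_for_intent(intent: str) -> list[str]:
--     """Translate an `intent` string from the UI into the concrete scope list."""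
--     parts = {p.strip().lower() for p in (intent or "all").split(",") if p.strip()}
--     if "all" in parts or not parts:
--         parts = {"gmail", "calendar", "drive", "youtube", "tasks", "people", "sheets", "docs"}
--     selected: list[str] = list(SCOPES_IDENTITY)
--     if "gmail" in parts:
--         selected += SCOPES_GMAIL
--     if "calendar" in parts:
--         selected += SCOPES_CALENDAR
--     if "drive" in parts:
--         selected += SCOPES_DRIVE
--     if "youtube" in parts:
--         selected += SCOPES_YOUTUBE
--     if "tasks" in parts:
--         selected += SCOPES_TASKS
--     if "people" in parts:
--         selected += SCOPES_PEOPLE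
--     if "sheets" in parts:
--         selected += SCOPES_SHEETS
--     if "docs" in parts:
--         selected += SCOPES_DOCS
--     # Deduplicate while preserving order.
--     seen: set[str] = set()
--     out: list[str] = []
--     for s in selected:
--         if s not in seen:
--             out.append(s)
--             seen.add(s)
--     return out
-- ===== SOURCE B (Python) =====
-- SCOPES_GMAIL = [
--     "https://www.googleapis.com/auth/gmail.modify",
--     "https://www.googleapis.com/auth/gmail.settings.basic",
-- ]
-- SCOPES_CALENDAR = ["https://www.googleapis.com/auth/calendar"]
-- SCOPES_DRIVE = ["https://www.googleapis.com/auth/drive"]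
-- SCOPES_YOUTUBE = [
--     "https://www.googleapis.com/auth/youtube.readonly",
--     "https://www.googleapis.com/auth/youtube",
--     "https://www.googleapis.com/auth/youtube.upload",
-- ]
-- SCOPES_TASKS = ["https://www.googleapis.com/auth/tasks"]
-- SCOPES_PEOPLE = ["https://www.googleapis.com/auth/contacts.readonly"]
-- SCOPES_SHEETS = ["https://www.googleapis.com/auth/spreadsheets"]
-- SCOPES_DOCS = ["https://www.googleapis.com/auth/documents.readonly"]
-- SCOPES_IDENTITY = ["openid", "email", "profile"]
--
-- # Ordered table replacing the eight hard-coded branches.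
-- _TABLE = [
--     ("gmail", SCOPES_GMAIL),
--     ("calendar", SCOPES_CALENDAR),
--     ("drive", SCOPES_DRIVE),
--     ("youtube", SCOPES_YOUTUBE),
--     ("tasks", SCOPES_TASKS),
--     ("people", SCOPES_PEOPLE),
--     ("sheets", SCOPES_SHEETS),
--     ("docs", SCOPES_DOCS),
-- ]
-- _ALL = ["gmail", "calendar", "drive", "youtube", "tasks", "people", "sheets", "docs"]
--
--
-- def scopes_for_intent(intent: str) -> list[str]:
--     """Translate an `intent` string from the UI into the concrete scope list."""
--     parts = {p.strip().lower() for p in (intent or "all").split(",") if p.strip()}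
--     if "all" in parts or not parts:
--         parts = set(_ALL)
--     out = list(SCOPES_IDENTITY)
--     for name, scopes in _TABLE:
--         if name in parts:
--             out += scopes
--     # No dedup pass needed: all eleven scope strings are pairwise distinct.
--     return out
-- ===== Notes on version B (the rewrite author's own statement) =====
-- stated objective: simpler
-- what changed: Replaces A's eight hard-coded if-branches plus a trailing seen-set deduplication loop by a single fold over an ordered (category, scope-list) table, with no dedup pass at all since the eleven scope strings are pairwise distinct (the proof shows the dedup loop is the identity here).
import Mathlib
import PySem

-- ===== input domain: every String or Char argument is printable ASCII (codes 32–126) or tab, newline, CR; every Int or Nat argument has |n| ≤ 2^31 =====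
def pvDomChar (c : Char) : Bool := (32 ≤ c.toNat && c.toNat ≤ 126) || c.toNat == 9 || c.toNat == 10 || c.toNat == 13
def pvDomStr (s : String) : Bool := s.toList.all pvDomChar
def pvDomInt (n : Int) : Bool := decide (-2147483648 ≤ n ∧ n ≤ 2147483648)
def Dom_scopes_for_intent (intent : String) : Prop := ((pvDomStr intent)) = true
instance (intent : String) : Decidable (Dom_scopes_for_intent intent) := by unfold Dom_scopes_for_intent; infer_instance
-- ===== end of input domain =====

-- B replaces A's eight hard-coded if-branches plus trailing seen-set dedup loop by a single
-- fold over an ordered (category, scopes) table with no dedup pass (all scopes are distinct): simpler.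

-- shared module-level constants (identical in Source A and Source B)
def pySCOPES_GMAIL : List String :=
  ["https://www.googleapis.com/auth/gmail.modify",
   "https://www.googleapis.com/auth/gmail.settings.basic"]
def pySCOPES_CALENDAR : List String := ["https://www.googleapis.com/auth/calendar"]
def pySCOPES_DRIVE : List String := ["https://www.googleapis.com/auth/drive"]
def pySCOPES_YOUTUBE : List String :=
  ["https://www.googleapis.com/auth/youtube.readonly",
   "https://www.googleapis.com/auth/youtube",
   "https://www.googleapis.com/auth/youtube.upload"]
def pySCOPES_TASKS : List String := ["https://www.googleapis.com/auth/tasks"]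
def pySCOPES_PEOPLE : List String := ["https://www.googleapis.com/auth/contacts.readonly"]
def pySCOPES_SHEETS : List String := ["https://www.googleapis.com/auth/spreadsheets"]
def pySCOPES_DOCS : List String := ["https://www.googleapis.com/auth/documents.readonly"]
def pySCOPES_IDENTITY : List String := ["openid", "email", "profile"]

-- shared parsing line: {p.strip().lower() for p in (intent or "all").split(",") if p.strip()},
-- then the 'all or empty' expansion (identical line in Source A and Source B)
def pyParts (intent : String) : PySem.Set String :=
  let parts0 : PySem.Set String :=
    PySem.Set.ofList
      ((((PySem.Str.split? (if intent == "" then "all" else intent) ",").getD []).filter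
          (fun p => PySem.Str.strip p != "")).map
        (fun p => PySem.Str.lower (PySem.Str.strip p)))
  if PySem.Set.contains parts0 "all" || parts0.isEmpty then
    PySem.Set.ofList ["gmail", "calendar", "drive", "youtube", "tasks", "people", "sheets", "docs"]
  else parts0

-- ===== PORT A =====
def scopes_for_intent (intent : String) : List String :=
  let parts := pyParts intent
  let selected := pySCOPES_IDENTITY
  let selected := if PySem.Set.contains parts "gmail" then selected ++ pySCOPES_GMAIL else selected
  let selected := if PySem.Set.contains parts "calendar" then selected ++ pySCOPES_CALENDAR else selected
  let selected := if PySem.Set.contains parts "drive" then selected ++ pySCOPES_DRIVE else selected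
  let selected := if PySem.Set.contains parts "youtube" then selected ++ pySCOPES_YOUTUBE else selected
  let selected := if PySem.Set.contains parts "tasks" then selected ++ pySCOPES_TASKS else selected
  let selected := if PySem.Set.contains parts "people" then selected ++ pySCOPES_PEOPLE else selected
  let selected := if PySem.Set.contains parts "sheets" then selected ++ pySCOPES_SHEETS else selected
  let selected := if PySem.Set.contains parts "docs" then selected ++ pySCOPES_DOCS else selected
  -- the 'seen'/'out' dedup loop
  (selected.foldl
    (fun (st : PySem.Set String × List String) s =>
      if PySem.Set.contains st.1 s then st else (PySem.Set.add st.1 s, st.2 ++ [s]))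
    (PySem.Set.empty, [])).2

-- ===== PORT B =====
def pyTABLE : List (String × List String) :=
  [("gmail", pySCOPES_GMAIL), ("calendar", pySCOPES_CALENDAR), ("drive", pySCOPES_DRIVE),
   ("youtube", pySCOPES_YOUTUBE), ("tasks", pySCOPES_TASKS), ("people", pySCOPES_PEOPLE),
   ("sheets", pySCOPES_SHEETS), ("docs", pySCOPES_DOCS)]

def scopes_for_intent_alt (intent : String) : List String :=
  let parts := pyParts intent
  pyTABLE.foldl
    (fun out nl => if PySem.Set.contains parts nl.1 then out ++ nl.2 else out)
    pySCOPES_IDENTITY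

-- ===== PRECONDITION & SPEC =====
def Spec_scopes_for_intent (intent : String) (out : List String) : Prop := out = scopes_for_intent_alt intent
instance (intent : String) (out : List String) : Decidable (Spec_scopes_for_intent intent out) := by unfold Spec_scopes_for_intent; infer_instance

-- ===== CLAIM (what is proved, stated in full; the proofs are below) =====
def Claim_equal_scopes_for_intent : Prop := ∀ (intent : String), Dom_scopes_for_intent intent → Spec_scopes_for_intent intent (scopes_for_intent intent)

-- ===== LEMMAS AND PROOFS =====

-- A's dedup loop, started with seen = the set of the accumulated output, keeps that invariant:
-- it is Python's set-building (PySem.Set.update) run on both components at once.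
theorem dedup_loop_pair (l : List String) : ∀ s : PySem.Set String,
    l.foldl
      (fun (st : PySem.Set String × List String) x =>
        if PySem.Set.contains st.1 x then st else (PySem.Set.add st.1 x, st.2 ++ [x]))
      (s, s)
    = (PySem.Set.update s l, PySem.Set.update s l) := by
  induction l with
  | nil => intro s; rfl
  | cons x t ih =>
      intro s
      simp only [List.foldl]
      have hadd :
          (if PySem.Set.contains s x = true then (s, s)
           else (PySem.Set.add s x, s ++ [x]))
          = (PySem.Set.add s x, PySem.Set.add s x) := by
        unfold PySem.Set.add
        cases PySem.Set.contains s x <;> simp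
      rw [hadd, ih]
      rfl

-- B's table fold adds each category's scopes at most once, in table order: its result is
-- the identity scopes followed by a sublist of the table's scope lists concatenated.
theorem foldl_table_sublist (P : PySem.Set String) (T : List (String × List String)) :
    ∀ out : List String, ∃ r,
      T.foldl (fun o nl => if PySem.Set.contains P nl.1 then o ++ nl.2 else o) out = out ++ r
      ∧ r.Sublist (T.map Prod.snd).flatten := by
  induction T with
  | nil => exact fun out => ⟨[], by simp, by simp⟩
  | cons nl T ih =>
      intro out
      simp only [List.foldl, List.map, List.flatten_cons]
      cases hc : PySem.Set.contains P nl.1 with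
      | true =>
          obtain ⟨r, hr, hs⟩ := ih (out ++ nl.2)
          refine ⟨nl.2 ++ r, ?_, hs.append_left nl.2⟩
          simpa [List.append_assoc] using hr
      | false =>
          obtain ⟨r, hr, hs⟩ := ih out
          refine ⟨r, ?_, hs.trans (List.sublist_append_right nl.2 _)⟩
          simpa using hr

-- B's table fold at an arbitrary parts set is duplicate-free (the 11 scope strings are distinct).
theorem nodup_tableFold (P : PySem.Set String) :
    (pyTABLE.foldl
      (fun out nl => if PySem.Set.contains P nl.1 then out ++ nl.2 else out)
      pySCOPES_IDENTITY).Nodup := by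
  obtain ⟨r, hr, hs⟩ := foldl_table_sublist P pyTABLE pySCOPES_IDENTITY
  rw [hr]
  have hfull : (pySCOPES_IDENTITY ++ (pyTABLE.map Prod.snd).flatten).Nodup := by decide
  exact hfull.sublist ((List.Sublist.refl pySCOPES_IDENTITY).append hs)

-- A's whole post-parsing body equals B's, for every parts set.
theorem body_eq (P : PySem.Set String) :
    ((pyTABLE.foldl
        (fun out nl => if PySem.Set.contains P nl.1 then out ++ nl.2 else out)
        pySCOPES_IDENTITY).foldl
      (fun (st : PySem.Set String × List String) x =>
        if PySem.Set.contains st.1 x then st else (PySem.Set.add st.1 x, st.2 ++ [x]))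
      (PySem.Set.empty, [])).2
    = pyTABLE.foldl
        (fun out nl => if PySem.Set.contains P nl.1 then out ++ nl.2 else out)
        pySCOPES_IDENTITY := by
  rw [show (PySem.Set.empty, ([] : List String))
        = ((PySem.Set.empty : PySem.Set String), (PySem.Set.empty : PySem.Set String)) from rfl,
      dedup_loop_pair]
  exact PySem.Set.ofList_eq_self_of_nodup _ (nodup_tableFold P)

-- ===== VERDICT (by name: the statement is the Claim_ definition above) =====
set_option maxHeartbeats 1600000 in
theorem scopes_for_intent_spec : Claim_equal_scopes_for_intent := by
  intro intent _
  exact body_eq (pyParts intent)
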